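-- pv_equiv track=rewrite | github.com/tanishque-suthar/codebase_documentation | backend/services/github_service.py | prioritize_files_by_language
-- ===== SOURCE A (Python) =====
-- from typing import Dict, List, Optional
--
-- def is_likely_code_file(filename: str) -> bool:
--     """Check if a file is likely to contain code based on its extension"""
--     code_extensions = {
--         '.py', '.js', '.ts', '.jsx', '.tsx', '.java', '.cpp', '.c', '.cs', '.php',
--         '.rb', '.go', '.rs', '.swift', '.kt', '.scala', '.m', '.h', '.hpp',
--         '.css', '.scss', '.sass', '.less', '.html', '.htm', '.xml', '.json',
--         '.yaml', '.yml', '.toml', '.ini', '.cfg', '.conf', '.md', '.rst',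
--         '.txt', '.sql', '.sh', '.bat', '.ps1', '.dockerfile', '.makefile'
--     }
--
--     filename_lower = filename.lower()
--     file_ext = '.' + filename_lower.split('.')[-1] if '.' in filename_lower else ''
--
--     # Check common filenames without extensions
--     common_files = {'readme', 'license', 'changelog', 'makefile', 'dockerfile'}
--     if filename_lower in common_files:
--         return True
--
--     return file_ext in code_extensions
--
-- def prioritize_files_by_language(files: List[Dict], repo_languages: Dict[str, int]) -> List[Dict]:
--     """Prioritize files based on repository's primary languages"""
--     if not repo_languages:
--         return files
--
--     # Get primary languages (top 3)
--     primary_langs = list(repo_languages.keys())[:3]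
--
--     # Language to file extension mapping
--     lang_extensions = {
--         'Python': ['.py'],
--         'JavaScript': ['.js', '.jsx'],
--         'TypeScript': ['.ts', '.tsx'],
--         'Java': ['.java'],
--         'C++': ['.cpp', '.cc', '.cxx'],
--         'C': ['.c'],
--         'C#': ['.cs'],
--         'PHP': ['.php'],
--         'Ruby': ['.rb'],
--         'Go': ['.go'],
--         'Rust': ['.rs'],
--         'Swift': ['.swift'],
--         'Kotlin': ['.kt']
--     }
--
--     def get_priority(file_item):
--         filename = file_item['name'].lower()
--         file_ext = '.' + filename.split('.')[-1] if '.' in filename else ''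
--
--         # Highest priority for primary language files
--         for i, lang in enumerate(primary_langs):
--             if lang in lang_extensions:
--                 if file_ext in lang_extensions[lang]:
--                     return i  # 0 = highest priority
--
--         # Medium priority for other code files
--         if is_likely_code_file(filename):
--             return 10
--
--         # Lower priority for other files
--         return 20
--
--     return sorted(files, key=get_priority)
-- ===== SOURCE B (Python) =====
-- CODE_EXTENSIONS = [
--     '.py', '.js', '.ts', '.jsx', '.tsx', '.java', '.cpp', '.c', '.cs', '.php',
--     '.rb', '.go', '.rs', '.swift', '.kt', '.scala', '.m', '.h', '.hpp',
--     '.css', '.scss', '.sass', '.less', '.html', '.htm', '.xml', '.json',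
--     '.yaml', '.yml', '.toml', '.ini', '.cfg', '.conf', '.md', '.rst',
--     '.txt', '.sql', '.sh', '.bat', '.ps1', '.dockerfile', '.makefile'
-- ]
--
-- LANG_EXTENSIONS = {
--     'Python': ['.py'],
--     'JavaScript': ['.js', '.jsx'],
--     'TypeScript': ['.ts', '.tsx'],
--     'Java': ['.java'],
--     'C++': ['.cpp', '.cc', '.cxx'],
--     'C': ['.c'],
--     'C#': ['.cs'],
--     'PHP': ['.php'],
--     'Ruby': ['.rb'],
--     'Go': ['.go'],
--     'Rust': ['.rs'],
--     'Swift': ['.swift'],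
--     'Kotlin': ['.kt'],
-- }
--
-- COMMON_FILES = {'readme', 'license', 'changelog', 'makefile', 'dockerfile'}
--
--
-- def _ext_priority_table(primary_langs):
--     """Precompute extension -> priority once (first write wins, so the
--     earliest primary language keeps its index; code extensions default to 10)."""
--     prio = {}
--     for i, lang in enumerate(primary_langs):
--         for ext in LANG_EXTENSIONS.get(lang, []):
--             prio.setdefault(ext, i)
--     for ext in CODE_EXTENSIONS:
--         prio.setdefault(ext, 10)
--     return prio
--
--
-- def prioritize_files_by_language(files, repo_languages):
--     """One precomputed extension->priority table + one bucketing pass,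
--     instead of a per-file language scan fed into a comparison sort."""
--     if not repo_languages:
--         return files
--     primary_langs = list(repo_languages.keys())[:3]
--     prio = _ext_priority_table(primary_langs)
--     buckets = {p: [] for p in (0, 1, 2, 10, 20)}
--     for f in files:
--         name = f['name'].lower()
--         ext = '.' + name.split('.')[-1] if '.' in name else ''
--         p = prio.get(ext)
--         if p is None:
--             p = 10 if name in COMMON_FILES else 20
--         buckets[p].append(f)
--     return [f for p in (0, 1, 2, 10, 20) for f in buckets[p]]
-- ===== Notes on version B (the rewrite author's own statement) =====
-- stated objective: alternative
-- what changed: Instead of A's per-file scan over the primary languages fed into sorted(), B precomputes one extension->priority dict (setdefault: earliest primary language wins, code extensions default to 10) and then buckets the files in a single pass over the five priority levels, concatenating buckets in ascending order to preserve the stable tie order.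
import Mathlib
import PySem

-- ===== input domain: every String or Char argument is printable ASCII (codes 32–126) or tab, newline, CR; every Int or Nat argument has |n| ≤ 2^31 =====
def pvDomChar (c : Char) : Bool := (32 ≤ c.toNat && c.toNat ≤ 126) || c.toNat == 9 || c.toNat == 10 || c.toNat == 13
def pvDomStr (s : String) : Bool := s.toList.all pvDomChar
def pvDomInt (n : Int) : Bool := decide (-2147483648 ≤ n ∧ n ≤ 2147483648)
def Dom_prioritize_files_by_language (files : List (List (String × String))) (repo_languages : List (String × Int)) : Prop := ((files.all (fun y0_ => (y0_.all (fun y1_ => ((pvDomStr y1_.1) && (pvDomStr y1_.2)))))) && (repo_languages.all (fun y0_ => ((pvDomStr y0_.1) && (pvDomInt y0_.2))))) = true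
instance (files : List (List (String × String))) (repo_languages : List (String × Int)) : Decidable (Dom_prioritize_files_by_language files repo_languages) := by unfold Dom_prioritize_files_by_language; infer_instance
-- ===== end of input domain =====

-- B precomputes an extension→priority table once (setdefault: first write wins) and buckets the
-- files in a single pass, instead of A's per-file scan over the primary languages fed to a stable sort.

-- ===== PORT A =====
-- module constants shared by Source A and Source B

def codeExtensions : List String :=
  [".py", ".js", ".ts", ".jsx", ".tsx", ".java", ".cpp", ".c", ".cs", ".php",
   ".rb", ".go", ".rs", ".swift", ".kt", ".scala", ".m", ".h", ".hpp",
   ".css", ".scss", ".sass", ".less", ".html", ".htm", ".xml", ".json",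
   ".yaml", ".yml", ".toml", ".ini", ".cfg", ".conf", ".md", ".rst",
   ".txt", ".sql", ".sh", ".bat", ".ps1", ".dockerfile", ".makefile"]

def commonFiles : List String := ["readme", "license", "changelog", "makefile", "dockerfile"]

def langExtensions : PySem.Dict String (List String) :=
  PySem.Dict.ofList
    [("Python", [".py"]), ("JavaScript", [".js", ".jsx"]), ("TypeScript", [".ts", ".tsx"]),
     ("Java", [".java"]), ("C++", [".cpp", ".cc", ".cxx"]), ("C", [".c"]), ("C#", [".cs"]),
     ("PHP", [".php"]), ("Ruby", [".rb"]), ("Go", [".go"]), ("Rust", [".rs"]),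
     ("Swift", [".swift"]), ("Kotlin", [".kt"])]

-- '.' + filename.split('.')[-1] if '.' in filename else ''
def extOf (filename : String) : String :=
  if PySem.Str.isIn "." filename then
    "." ++ ((PySem.List.pyGet? ((PySem.Str.split? filename ".").getD []) (-1)).getD "")
  else ""

def is_likely_code_file (filename : String) : Bool :=
  let filename_lower := PySem.Str.lower filename
  let file_ext := extOf filename_lower
  if commonFiles.contains filename_lower then true
  else codeExtensions.contains file_ext

-- the 'for i, lang in enumerate(primary_langs)' loop of get_priority
def findPrimary (file_ext : String) (langs : List String) (i : Int) : Option Int :=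
  match langs with
  | [] => none
  | lang :: rest =>
    match langExtensions.get? lang with
    | some exts => if exts.contains file_ext then some i else findPrimary file_ext rest (i + 1)
    | none => findPrimary file_ext rest (i + 1)

-- get_priority(file_item); on a file without a 'name' key Python raises KeyError (excluded by Pre_)
def get_priority (primary_langs : List String) (file_item : List (String × String)) : Int :=
  let filename := PySem.Str.lower (((PySem.Dict.mk file_item).get? "name").getD "")
  let file_ext := extOf filename
  match findPrimary file_ext primary_langs 0 with
  | some i => i
  | none => if is_likely_code_file filename then 10 else 20

def prioritize_files_by_language (files : List (List (String × String))) (repo_languages : List (String × Int)) : List (List (String × String)) :=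
  if repo_languages = [] then files
  else
    let primary_langs := PySem.List.slice (PySem.Dict.ofList repo_languages).keys none (some 3)
    PySem.List.sorted files (fun f => get_priority primary_langs f) false

-- ===== PORT B =====
-- inner loop of _ext_priority_table: prio.setdefault(ext, v) for each ext
def setdefaultFold (v : Int) (exts : List String) (d : PySem.Dict String Int) : PySem.Dict String Int :=
  exts.foldl (fun d e => d.setdefault e v) d

-- 'for i, lang in enumerate(primary_langs): for ext in LANG_EXTENSIONS.get(lang, []): prio.setdefault(ext, i)'
def buildLangTable (langs : List String) (i : Int) (d : PySem.Dict String Int) : PySem.Dict String Int :=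
  match langs with
  | [] => d
  | lang :: rest => buildLangTable rest (i + 1) (setdefaultFold i ((langExtensions.get? lang).getD []) d)

def extPriorityTable (primary_langs : List String) : PySem.Dict String Int :=
  setdefaultFold 10 codeExtensions (buildLangTable primary_langs 0 PySem.Dict.empty)

-- the per-file body of Source B's bucketing loop: table lookup, then the common-filename fallback
def priorityB (prio : PySem.Dict String Int) (f : List (String × String)) : Int :=
  let name := PySem.Str.lower (((PySem.Dict.mk f).get? "name").getD "")
  let ext := if PySem.Str.isIn "." name then
      "." ++ ((PySem.List.pyGet? ((PySem.Str.split? name ".").getD []) (-1)).getD "")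
    else ""
  match prio.get? ext with
  | some p => p
  | none => if commonFiles.contains name then 10 else 20

def prioritize_files_by_language_alt (files : List (List (String × String))) (repo_languages : List (String × Int)) : List (List (String × String)) :=
  if repo_languages = [] then files
  else
    let primary_langs := PySem.List.slice (PySem.Dict.ofList repo_languages).keys none (some 3)
    let prio := extPriorityTable primary_langs
    let init : PySem.Dict Int (List (List (String × String))) :=
      PySem.Dict.ofList [(0, []), (1, []), (2, []), (10, []), (20, [])]
    let buckets := files.foldl (fun d f => d.modify (priorityB prio f) [] (· ++ [f])) init
    buckets.getD 0 [] ++ buckets.getD 1 [] ++ buckets.getD 2 [] ++ buckets.getD 10 [] ++ buckets.getD 20 []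

-- ===== PRECONDITION & SPEC =====
-- Pre_ excludes exactly the inputs where Python A raises KeyError: a nonempty repo_languages
-- together with some file dict lacking the 'name' key.
def Pre_prioritize_files_by_language (files : List (List (String × String))) (repo_languages : List (String × Int)) : Prop :=
  repo_languages = [] ∨ ∀ f ∈ files, (PySem.Dict.mk f).contains "name" = true
instance (files : List (List (String × String))) (repo_languages : List (String × Int)) : Decidable (Pre_prioritize_files_by_language files repo_languages) := by unfold Pre_prioritize_files_by_language; infer_instance

def pvWitness_prioritize_files_by_language : (List (List (String × String))) × (List (String × Int)) :=
  ([[("name", "a.py")], [("name", "readme")]], [("Python", 12)])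

def Spec_prioritize_files_by_language (files : List (List (String × String))) (repo_languages : List (String × Int)) (out : List (List (String × String))) : Prop := out = prioritize_files_by_language_alt files repo_languages
instance (files : List (List (String × String))) (repo_languages : List (String × Int)) (out : List (List (String × String))) : Decidable (Spec_prioritize_files_by_language files repo_languages out) := by unfold Spec_prioritize_files_by_language; infer_instance

-- ===== CLAIM (what is proved, stated in full; the proofs are below) =====
def Claim_equal_prioritize_files_by_language : Prop := ∀ (files : List (List (String × String))) (repo_languages : List (String × Int)), Dom_prioritize_files_by_language files repo_languages → Pre_prioritize_files_by_language files repo_languages → Spec_prioritize_files_by_language files repo_languages (prioritize_files_by_language files repo_languages)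

-- ===== LEMMAS AND PROOFS =====

-- lowercasing is idempotent (character level)
theorem lowerChar_idem (c : Char) : PySem.Chars.lowerChar (PySem.Chars.lowerChar c) = PySem.Chars.lowerChar c := by
  unfold PySem.Chars.lowerChar PySem.Chars.isupper
  split_ifs with h1 h2 <;> try rfl
  exfalso
  simp only [Bool.and_eq_true, decide_eq_true_eq, Char.le_def] at h1 h2
  obtain ⟨ha, hb⟩ := h1
  obtain ⟨ha2, hb2⟩ := h2
  have ha' := UInt32.le_iff_toNat_le.mp ha
  have hb' := UInt32.le_iff_toNat_le.mp hb
  have hb2' := UInt32.le_iff_toNat_le.mp hb2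
  have hA : ('A' : Char).val.toNat = 65 := rfl
  have hZ : ('Z' : Char).val.toNat = 90 := rfl
  rw [hA] at ha'
  rw [hZ] at hb' hb2'
  have hvalid : (c.toNat + 32).isValidChar := Or.inl (by unfold Char.toNat at *; omega)
  have hv : (Char.ofNat (c.toNat + 32)).toNat = c.toNat + 32 := by
    rw [Char.toNat_ofNat, if_pos hvalid]
  unfold Char.toNat at *
  omega

-- lowercasing is idempotent (string level)
theorem lower_idem (s : String) : PySem.Str.lower (PySem.Str.lower s) = PySem.Str.lower s := by
  unfold PySem.Str.lower PySem.Chars.lower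
  simp [List.map_map, Function.comp_def, lowerChar_idem]

-- get? through the setdefault fold: the old binding wins, otherwise membership gives v
theorem get?_setdefaultFold (v : Int) (exts : List String) (d : PySem.Dict String Int) (e : String) :
    (setdefaultFold v exts d).get? e =
      Option.or (d.get? e) (if exts.contains e then some v else none) := by
  induction exts generalizing d with
  | nil => simp [setdefaultFold, Option.or_none]
  | cons x xs ih =>
    show (setdefaultFold v xs (d.setdefault x v)).get? e = _
    rw [ih]
    by_cases hx : e = x
    · subst hx
      rw [PySem.Dict.get?_setdefault_self]
      cases hd : d.get? e <;> simp [Option.some_or, Option.getD]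
    · rw [PySem.Dict.get?_setdefault_of_ne _ _ hx]
      simp only [List.contains_cons]
      have hxe : (e == x) = false := by simp [hx]
      rw [hxe]
      simp

-- get? through the enumerate-loop table equals A's findPrimary scan
theorem get?_buildLangTable (langs : List String) (i : Int) (d : PySem.Dict String Int) (e : String) :
    (buildLangTable langs i d).get? e = Option.or (d.get? e) (findPrimary e langs i) := by
  induction langs generalizing i d with
  | nil => simp [buildLangTable, findPrimary, Option.or_none]
  | cons lang rest ih =>
    show (buildLangTable rest (i + 1) (setdefaultFold i ((langExtensions.get? lang).getD []) d)).get? e = _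
    rw [ih, get?_setdefaultFold]
    rcases hg : langExtensions.get? lang with _ | exts
    · cases hd : d.get? e <;> simp [findPrimary, hg, Option.none_or, Option.some_or]
    · simp only [findPrimary, hg, Option.getD]
      cases hd : d.get? e
      · simp only [Option.none_or]
        split_ifs <;> simp [Option.some_or, Option.none_or]
      · simp [Option.some_or]

theorem get?_extPriorityTable (primary : List String) (e : String) :
    (extPriorityTable primary).get? e =
      Option.or (findPrimary e primary 0) (if codeExtensions.contains e then some 10 else none) := by
  unfold extPriorityTable
  rw [get?_setdefaultFold, get?_buildLangTable]
  simp [PySem.Dict.get?_empty, Option.none_or]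

-- B's table lookup computes exactly A's get_priority
theorem priorityB_eq (primary : List String) (f : List (String × String)) :
    priorityB (extPriorityTable primary) f = get_priority primary f := by
  simp only [priorityB, get_priority]
  set name := PySem.Str.lower (((PySem.Dict.mk f).get? "name").getD "") with hname
  have hlow : PySem.Str.lower name = name := by rw [hname]; exact lower_idem _
  rw [show (if PySem.Str.isIn "." name = true then
        "." ++ ((PySem.List.pyGet? ((PySem.Str.split? name ".").getD []) (-1)).getD "")
      else "") = extOf name from rfl]
  rw [get?_extPriorityTable]
  rcases hp : findPrimary (extOf name) primary 0 with _ | j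
  · simp only [Option.none_or, is_likely_code_file, hlow]
    by_cases hcode : extOf name ∈ codeExtensions
    · by_cases hcom : name ∈ commonFiles <;> simp [hcode, hcom]
    · simp [hcode]
  · simp [Option.some_or]

-- findPrimary can only return an index in [i, i + langs.length)
theorem findPrimary_bounds (file_ext : String) (langs : List String) (i j : Int)
    (h : findPrimary file_ext langs i = some j) : i ≤ j ∧ j < i + langs.length := by
  induction langs generalizing i with
  | nil => simp [findPrimary] at h
  | cons lang rest ih =>
    simp only [findPrimary] at h
    rcases hg : langExtensions.get? lang with _ | exts <;> simp only [hg] at h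
    · have := ih (i + 1) h
      simp only [List.length_cons]
      push_cast
      omega
    · split_ifs at h with hc
      · cases h
        simp only [List.length_cons]
        push_cast
        omega
      · have := ih (i + 1) h
        simp only [List.length_cons]
        push_cast
        omega

-- with at most 3 primary languages the priority is one of the five levels
theorem get_priority_mem (primary_langs : List String) (f : List (String × String))
    (h3 : primary_langs.length ≤ 3) :
    get_priority primary_langs f = 0 ∨ get_priority primary_langs f = 1 ∨
    get_priority primary_langs f = 2 ∨ get_priority primary_langs f = 10 ∨
    get_priority primary_langs f = 20 := by
  unfold get_priority
  rcases hf : findPrimary (extOf (PySem.Str.lower (((PySem.Dict.mk f).get? "name").getD ""))) primary_langs 0 with _ | j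
  · simp only [hf]
    split_ifs <;> simp
  · simp only [hf]
    have hb := findPrimary_bounds _ _ _ _ hf
    omega

-- insertBy drops x between the ≤-part and the >-part
theorem insertBy_split {α : Type} (p : α → Int) (x : α) (lo hi : List α)
    (hlo : ∀ y ∈ lo, p y ≤ p x) (hhi : ∀ y ∈ hi, p x < p y) :
    PySem.List.insertBy (fun a b => decide (p a < p b)) x (lo ++ hi) = lo ++ x :: hi := by
  induction lo with
  | nil =>
    cases hi with
    | nil => simp [PySem.List.insertBy]
    | cons y ys => simp [PySem.List.insertBy, hhi y (by simp)]
  | cons a lo ih =>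
    have ha : ¬ p x < p a := not_lt.2 (hlo a (by simp))
    simp only [List.cons_append, PySem.List.insertBy, decide_eq_true_eq, if_neg ha]
    rw [ih (fun y hy => hlo y (by simp [hy]))]

-- a stable sort by a key confined to {0,1,2,10,20} is the concatenation of the five filters
theorem sorted_eq_buckets {α : Type} (p : α → Int) (xs : List α)
    (hp : ∀ x ∈ xs, p x = 0 ∨ p x = 1 ∨ p x = 2 ∨ p x = 10 ∨ p x = 20) :
    PySem.List.sorted xs p false =
      xs.filter (fun x => p x == 0) ++ xs.filter (fun x => p x == 1) ++
      xs.filter (fun x => p x == 2) ++ xs.filter (fun x => p x == 10) ++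
      xs.filter (fun x => p x == 20) := by
  induction xs using List.reverseRecOn with
  | nil => simp [PySem.List.sorted]
  | append_singleton xs x ih =>
    have hx := hp x (by simp)
    have hxs : ∀ y ∈ xs, p y = 0 ∨ p y = 1 ∨ p y = 2 ∨ p y = 10 ∨ p y = 20 :=
      fun y hy => hp y (by simp [hy])
    rw [PySem.List.sorted_eq_foldl_insertBy, List.foldl_append,
        ← PySem.List.sorted_eq_foldl_insertBy, ih hxs]
    simp only [List.foldl_cons, List.foldl_nil, List.filter_append, List.filter_cons,
      List.filter_nil]
    have hmem : ∀ (c : Int) (y : α), y ∈ xs.filter (fun z => p z == c) → p y = c := by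
      intro c y hy
      have := List.of_mem_filter hy
      simpa using this
    rcases hx with h | h | h | h | h
    · have e := insertBy_split p x (xs.filter (fun z => p z == 0))
        (xs.filter (fun z => p z == 1) ++ (xs.filter (fun z => p z == 2) ++
          (xs.filter (fun z => p z == 10) ++ xs.filter (fun z => p z == 20))))
        (by intro y hy
            rw [h]
            have := hmem 0 y hy; omega)
        (by intro y hy
            rw [h]
            simp only [List.mem_append] at hy
            rcases hy with hy | hy | hy | hy
            · have := hmem 1 y hy; omega
            · have := hmem 2 y hy; omega
            · have := hmem 10 y hy; omega
            · have := hmem 20 y hy; omega)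
      simp only [h]
      norm_num
      rw [e]
    · have e := insertBy_split p x (xs.filter (fun z => p z == 0) ++ xs.filter (fun z => p z == 1))
        (xs.filter (fun z => p z == 2) ++
          (xs.filter (fun z => p z == 10) ++ xs.filter (fun z => p z == 20)))
        (by intro y hy
            rw [h]
            simp only [List.mem_append] at hy
            rcases hy with hy | hy
            · have := hmem 0 y hy; omega
            · have := hmem 1 y hy; omega)
        (by intro y hy
            rw [h]
            simp only [List.mem_append] at hy
            rcases hy with hy | hy | hy
            · have := hmem 2 y hy; omega
            · have := hmem 10 y hy; omega
            · have := hmem 20 y hy; omega)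
      simp only [h]
      norm_num
      simp only [List.append_assoc] at e ⊢
      rw [e]
    · have e := insertBy_split p x
        (xs.filter (fun z => p z == 0) ++ (xs.filter (fun z => p z == 1) ++ xs.filter (fun z => p z == 2)))
        (xs.filter (fun z => p z == 10) ++ xs.filter (fun z => p z == 20))
        (by intro y hy
            rw [h]
            simp only [List.mem_append] at hy
            rcases hy with hy | hy | hy
            · have := hmem 0 y hy; omega
            · have := hmem 1 y hy; omega
            · have := hmem 2 y hy; omega)
        (by intro y hy
            rw [h]
            simp only [List.mem_append] at hy
            rcases hy with hy | hy
            · have := hmem 10 y hy; omega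
            · have := hmem 20 y hy; omega)
      simp only [h]
      norm_num
      simp only [List.append_assoc] at e ⊢
      rw [e]
    · have e := insertBy_split p x
        (xs.filter (fun z => p z == 0) ++ (xs.filter (fun z => p z == 1) ++
          (xs.filter (fun z => p z == 2) ++ xs.filter (fun z => p z == 10))))
        (xs.filter (fun z => p z == 20))
        (by intro y hy
            rw [h]
            simp only [List.mem_append] at hy
            rcases hy with hy | hy | hy | hy
            · have := hmem 0 y hy; omega
            · have := hmem 1 y hy; omega
            · have := hmem 2 y hy; omega
            · have := hmem 10 y hy; omega)
        (by intro y hy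
            rw [h]
            have := hmem 20 y hy; omega)
      simp only [h]
      norm_num
      simp only [List.append_assoc] at e ⊢
      rw [e]
    · have e := insertBy_split p x
        (xs.filter (fun z => p z == 0) ++ (xs.filter (fun z => p z == 1) ++
          (xs.filter (fun z => p z == 2) ++ (xs.filter (fun z => p z == 10) ++
            xs.filter (fun z => p z == 20))))) []
        (by intro y hy
            rw [h]
            simp only [List.mem_append] at hy
            rcases hy with hy | hy | hy | hy | hy
            · have := hmem 0 y hy; omega
            · have := hmem 1 y hy; omega
            · have := hmem 2 y hy; omega
            · have := hmem 10 y hy; omega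
            · have := hmem 20 y hy; omega)
        (by simp)
      simp only [h]
      norm_num
      simp only [List.append_assoc, List.append_nil] at e ⊢
      rw [e]

-- ===== VERDICT (by name: the statement is the Claim_ definition above) =====
theorem prioritize_files_by_language_spec : Claim_equal_prioritize_files_by_language := by
  intro files repo _hdom _hpre
  unfold Spec_prioritize_files_by_language
  unfold prioritize_files_by_language prioritize_files_by_language_alt
  by_cases hr : repo = []
  · simp [hr]
  · simp only [if_neg hr]
    have hfun : (fun (d : PySem.Dict Int (List (List (String × String)))) f =>
        d.modify (priorityB (extPriorityTable (PySem.List.slice (PySem.Dict.ofList repo).keys none (some 3))) f) [] (· ++ [f]))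
        = (fun d f => d.modify (get_priority (PySem.List.slice (PySem.Dict.ofList repo).keys none (some 3)) f) [] (· ++ [f])) := by
      funext d f
      rw [priorityB_eq]
    rw [hfun]
    have h3 : (PySem.List.slice (PySem.Dict.ofList repo).keys none (some 3)).length ≤ 3 := by
      rw [PySem.List.slice_to _ (by norm_num)]
      simp
    have hA := sorted_eq_buckets (fun f => get_priority (PySem.List.slice (PySem.Dict.ofList repo).keys none (some 3)) f) files
      (fun f _ => get_priority_mem _ f h3)
    rw [hA]
    have hb : files.foldl
        (fun d f => PySem.Dict.modify d (get_priority (PySem.List.slice (PySem.Dict.ofList repo).keys none (some 3)) f) [] (· ++ [f]))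
        (PySem.Dict.ofList [(0, []), (1, []), (2, []), (10, []), (20, [])])
        = (files.map (fun f => (get_priority (PySem.List.slice (PySem.Dict.ofList repo).keys none (some 3)) f, f))).foldl
            (fun d q => PySem.Dict.modify d q.1 [] (· ++ [q.2]))
            (PySem.Dict.ofList [(0, []), (1, []), (2, []), (10, []), (20, [])]) :=
      (List.foldl_map
        (f := fun f => (get_priority (PySem.List.slice (PySem.Dict.ofList repo).keys none (some 3)) f, f))
        (g := fun d q => PySem.Dict.modify d q.1 [] (· ++ [q.2]))
        (l := files)
        (init := PySem.Dict.ofList [(0, []), (1, []), (2, []), (10, []), (20, [])])).symm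
    have g0 : (PySem.Dict.ofList [((0:Int), ([]:List (List (String × String)))), (1, []), (2, []), (10, []), (20, [])]).getD 0 [] = [] := rfl
    have g1 : (PySem.Dict.ofList [((0:Int), ([]:List (List (String × String)))), (1, []), (2, []), (10, []), (20, [])]).getD 1 [] = [] := rfl
    have g2 : (PySem.Dict.ofList [((0:Int), ([]:List (List (String × String)))), (1, []), (2, []), (10, []), (20, [])]).getD 2 [] = [] := rfl
    have g10 : (PySem.Dict.ofList [((0:Int), ([]:List (List (String × String)))), (1, []), (2, []), (10, []), (20, [])]).getD 10 [] = [] := rfl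
    have g20 : (PySem.Dict.ofList [((0:Int), ([]:List (List (String × String)))), (1, []), (2, []), (10, []), (20, [])]).getD 20 [] = [] := rfl
    simp only [hb, PySem.Dict.getD_foldl_modify_append, List.filter_map, List.map_map]
    simp [Function.comp_def, List.append_assoc, g0, g1, g2, g10, g20]
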